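-- pv_equiv track=rewrite | github.com/memoization-over-Recursion/Algorithms-and-data-structures | apartmentHunting/apartmentHuntingFaster.py | getMini
-- ===== SOURCE A (Python) =====
-- def getMini( ar , req ):
--     minDistances = [0 for i in range( len( ar ) ) ]
--     closest = float("inf")
--     for i in range( len( ar ) ):
--         if(ar[i][req]):
--             closest = i
--         minDistances[i] = distanceBetween( i , closest)
--     for j in reversed( range( len( ar ) ) ):
--         if(ar[j][req]):
--             closest = j
--         minDistances[j] = min( minDistances[j] , distanceBetween( j , closest ) )
--     return minDistances
--
-- def distanceBetween( i , j ):
--     return abs( i - j )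
-- ===== SOURCE B (Python) =====
-- def getMini(ar, req):
--     n = len(ar)
--     positions = [i for i in range(n) if ar[i][req]]
--     if not positions:
--         return [float("inf")] * n
--     res = []
--     k = 0  # index into positions: at use time, first position >= i
--     for i in range(n):
--         if k < len(positions) and positions[k] < i:
--             k += 1
--         if k == len(positions):
--             res.append(i - positions[-1])
--         elif k == 0:
--             res.append(positions[0] - i)
--         else:
--             res.append(min(positions[k] - i, i - positions[k - 1]))
--     return res
-- ===== Notes on version B (the rewrite author's own statement) =====
-- stated objective: alternative
-- what changed: A's two propagating scans (nearest match carried left-to-right, then right-to-left with an in-place min) are replaced by building the sorted table of matching indices once and doing a single pass that reads the two neighbouring candidates via a monotone pointer into that table.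
-- outside the precondition, e.g. on getMini([{'a': False}], 'a'): A returns [inf], B returns [inf]
import Mathlib
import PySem

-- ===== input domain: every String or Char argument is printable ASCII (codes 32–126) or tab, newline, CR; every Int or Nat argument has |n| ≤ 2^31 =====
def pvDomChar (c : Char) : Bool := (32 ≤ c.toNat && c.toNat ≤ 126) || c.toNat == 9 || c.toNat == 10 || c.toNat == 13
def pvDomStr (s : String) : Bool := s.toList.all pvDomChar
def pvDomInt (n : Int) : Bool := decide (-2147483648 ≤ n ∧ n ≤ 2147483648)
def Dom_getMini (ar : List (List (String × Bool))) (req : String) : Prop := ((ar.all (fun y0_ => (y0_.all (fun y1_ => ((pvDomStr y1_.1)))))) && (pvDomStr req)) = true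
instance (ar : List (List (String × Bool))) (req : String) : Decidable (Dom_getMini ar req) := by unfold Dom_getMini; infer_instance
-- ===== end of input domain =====

-- B replaces A's two propagating min-distance sweeps by one pass over a precomputed table of
-- matching indices, reading the two neighbouring candidates with a monotone pointer (objective:
-- alternative; same O(n) cost).

-- Python dict lookup, first match in the association list (None = KeyError, excluded by Pre_)
def pvLookup (row : List (String × Bool)) (req : String) : Option Bool :=
  (row.find? (fun p => p.1 == req)).map (·.2)

-- `ar[i][req]` as a Bool; the `.getD false` / out-of-range arms are never reached on inputs
-- admitted by Pre_ (key present in every row, index produced by range(len(ar)))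
def pvMatch (ar : List (List (String × Bool))) (req : String) (i : Int) : Bool :=
  match PySem.List.pyGet? ar i with
  | some row => (pvLookup row req).getD false
  | none => false

-- ===== PORT A =====
-- `closest` is float("inf") or an index: modelled as Option Int with none = inf (exact: the
-- only float values A manipulates are inf and exact small ints)
def pvDistanceBetween (i : Int) (j : Option Int) : Option Int :=
  j.map (fun c => |i - c|)   -- abs(i - inf) = inf

-- min with none = +inf (Python's min on these values)
def pvMinInf : Option Int → Option Int → Option Int
  | none, b => b
  | some a, none => some a
  | some a, some b => some (min a b)

def getMini (ar : List (List (String × Bool))) (req : String) : List Int :=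
  let n : Int := (ar.length : Int)
  -- first loop: minDistances built left to right, threading `closest`
  let fwd := (PySem.List.pyRange 0 n 1).foldl
    (fun (st : List (Option Int) × Option Int) i =>
      let closest := if pvMatch ar req i then some i else st.2
      (st.1 ++ [pvDistanceBetween i closest], closest))
    ([], none)
  -- second loop: for j in reversed(range(n)): in-place update expressed as read-old / cons-new
  let bwd := ((PySem.List.pyRange 0 n 1).reverse).foldl
    (fun (st : List (Option Int) × Option Int) j =>
      let closest := if pvMatch ar req j then some j else st.2
      (pvMinInf ((PySem.List.pyGet? fwd.1 j).getD none) (pvDistanceBetween j closest) :: st.1,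
       closest))
    ([], fwd.2)
  -- under Pre_ every entry is finite (some _); the getD 0 arm is never reached
  bwd.1.map (fun o => o.getD 0)

-- ===== PORT B =====
def getMini_alt (ar : List (List (String × Bool))) (req : String) : List Int :=
  let n : Int := (ar.length : Int)
  let positions := (PySem.List.pyRange 0 n 1).filter (fun i => pvMatch ar req i)
  if positions.isEmpty then
    -- Python B returns [float("inf")] * n here; unreachable under Pre_ (a match exists)
    List.replicate ar.length 0
  else
    ((PySem.List.pyRange 0 n 1).foldl
      (fun (st : List Int × Int) i =>
        -- if k < len(positions) and positions[k] < i: k += 1   (short-circuit: the read is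
        -- guarded by the first conjunct, so the getD 0 default is never the decider)
        let k := if st.2 < (positions.length : Int) &&
                    PySem.List.pyGetD positions st.2 0 < i then st.2 + 1 else st.2
        let v :=
          if k = (positions.length : Int) then i - PySem.List.pyGetD positions (-1) 0
          else if k = 0 then PySem.List.pyGetD positions 0 0 - i
          else min (PySem.List.pyGetD positions k 0 - i)
                   (i - PySem.List.pyGetD positions (k - 1) 0)
        (st.1 ++ [v], k))
      ([], 0)).1

-- ===== PRECONDITION & SPEC =====
-- Pre_ excludes (a) rows missing the key req, where A raises KeyError, and (b) inputs with no
-- True match, where A returns a list of float("inf") — floats, not values of the declared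
-- return type List Int (B's Python returns the same inf list there).
def Pre_getMini (ar : List (List (String × Bool))) (req : String) : Prop :=
  (∀ row ∈ ar, (pvLookup row req).isSome) ∧ (∃ row ∈ ar, pvLookup row req = some true)
instance (ar : List (List (String × Bool))) (req : String) : Decidable (Pre_getMini ar req) := by
  unfold Pre_getMini; infer_instance

def pvWitness_getMini : (List (List (String × Bool))) × String := ([[("a", true)], [("a", false)]], "a")

def Spec_getMini (ar : List (List (String × Bool))) (req : String) (out : List Int) : Prop := out = getMini_alt ar req
instance (ar : List (List (String × Bool))) (req : String) (out : List Int) : Decidable (Spec_getMini ar req out) := by unfold Spec_getMini; infer_instance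

-- ===== CLAIM (what is proved, stated in full; the proofs are below) =====
def Claim_equal_getMini : Prop := ∀ (ar : List (List (String × Bool))) (req : String), Dom_getMini ar req → Pre_getMini ar req → Spec_getMini ar req (getMini ar req)

-- ===== LEMMAS AND PROOFS =====

-- matches among indices [0, k)
def pvPk (ar : List (List (String × Bool))) (req : String) (k : Nat) : List Int :=
  (PySem.List.pyRange 0 (k : Int) 1).filter (fun i => pvMatch ar req i)

-- matches among indices [j, n)
def pvSfx (ar : List (List (String × Bool))) (req : String) (n j : Nat) : List Int :=
  (PySem.List.pyRange (j : Int) (n : Int) 1).filter (fun i => pvMatch ar req i)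

-- last matching index below k (A's forward `closest` after processing [0, k))
def pvLmb (ar : List (List (String × Bool))) (req : String) : Nat → Option Int
  | 0 => none
  | k + 1 => if pvMatch ar req (k : Int) then some (k : Int) else pvLmb ar req k

-- A's backward `closest` at step j (first match ≥ j, else the leftover last match)
def pvC2 (ar : List (List (String × Bool))) (req : String) (n j : Nat) : Option Int :=
  if _h : j < n then
    (if pvMatch ar req (j : Int) then some (j : Int) else pvC2 ar req n (j + 1))
  else pvLmb ar req n
termination_by n - j

-- per-index value of A's output
def pvVA (ar : List (List (String × Bool))) (req : String) (n j : Nat) : Int :=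
  (pvMinInf (pvDistanceBetween (j : Int) (pvLmb ar req (j + 1)))
            (pvDistanceBetween (j : Int) (pvC2 ar req n j))).getD 0

-- per-index value of B's output (k already adjusted to (pvPk j).length)
def pvWB (ar : List (List (String × Bool))) (req : String) (n j : Nat) : Int :=
  let P := pvPk ar req n
  let k : Int := ((pvPk ar req j).length : Int)
  if k = (P.length : Int) then (j : Int) - PySem.List.pyGetD P (-1) 0
  else if k = 0 then PySem.List.pyGetD P 0 0 - (j : Int)
  else min (PySem.List.pyGetD P k 0 - (j : Int))
           ((j : Int) - PySem.List.pyGetD P (k - 1) 0)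

theorem pvPk_succ (ar req k) :
    pvPk ar req (k + 1) = pvPk ar req k ++ (if pvMatch ar req (k : Int) then [(k : Int)] else []) := by
  unfold pvPk
  push_cast
  rw [PySem.List.pyRange_one_succ_right (by positivity), List.filter_append]
  by_cases h : pvMatch ar req (k : Int) <;> simp [h]


theorem pvLmb_eq (ar req) : ∀ k, pvLmb ar req k = (pvPk ar req k).getLast? := by
  intro k
  induction k with
  | zero => simp [pvLmb, pvPk, PySem.List.pyRange_one_eq_nil]
  | succ k ih =>
    rw [pvPk_succ]
    by_cases h : pvMatch ar req (k : Int) <;>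
      simp [pvLmb, h, ih]


theorem pvSfx_split (ar req) (n j : Nat) (h : j ≤ n) :
    pvPk ar req n = pvPk ar req j ++ pvSfx ar req n j := by
  unfold pvPk pvSfx
  rw [PySem.List.pyRange_one_append 0 (j:Int) (n:Int) (by positivity) (by exact_mod_cast h),
      List.filter_append]


theorem pvSfx_cons (ar req) (n j : Nat) (h : j < n) :
    pvSfx ar req n j = (if pvMatch ar req (j : Int) then [(j : Int)] else []) ++ pvSfx ar req n (j + 1) := by
  unfold pvSfx
  rw [PySem.List.pyRange_one_cons (by exact_mod_cast h)]
  rw [show ((j:Int)+1) = (((j+1:Nat)):Int) by push_cast; ring]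
  by_cases hm : pvMatch ar req (j : Int) <;> simp [hm]


theorem pvC2_eq (ar req) (n : Nat) : ∀ j, j ≤ n →
    pvC2 ar req n j = ((pvSfx ar req n j).head?).elim (pvLmb ar req n) some := by
  intro j
  induction hn : n - j generalizing j with
  | zero =>
    intro hle
    have hjn : j = n := by omega
    subst hjn
    unfold pvC2
    simp [pvSfx, PySem.List.pyRange_one_eq_nil]
  | succ m ih =>
    intro hle
    have hj : j < n := by omega
    unfold pvC2
    rw [dif_pos hj, pvSfx_cons ar req n j hj]
    by_cases hm : pvMatch ar req (j : Int)
    · simp [hm]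
    · simp only [hm, if_neg, Bool.false_eq_true, not_false_eq_true, List.nil_append]
      exact ih (j+1) (by omega) (by omega)


theorem pv_fwd_eq (ar : List (List (String × Bool))) (req : String) (n : Nat) :
    (PySem.List.pyRange 0 (n : Int) 1).foldl
      (fun (st : List (Option Int) × Option Int) i =>
        (st.1 ++ [pvDistanceBetween i (if pvMatch ar req i then some i else st.2)],
         if pvMatch ar req i then some i else st.2))
      ([], none)
    = ((List.range n).map (fun (j : Nat) => pvDistanceBetween (j : Int) (pvLmb ar req (j + 1))),
       pvLmb ar req n) := by
  induction n with
  | zero => simp [PySem.List.pyRange_one_eq_nil, pvLmb]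
  | succ n ih =>
    push_cast
    rw [PySem.List.pyRange_one_succ_right (by positivity), List.foldl_append, ih]
    simp only [List.foldl_cons, List.foldl_nil, List.range_succ, List.map_append, List.map_cons,
      List.map_nil]
    simp [pvLmb]

theorem pv_bwd_eq (ar : List (List (String × Bool))) (req : String) (n : Nat)
    (fw : List (Option Int)) :
    ∀ (j : Nat), j ≤ n → ∀ (res0 : List (Option Int)),
    ((PySem.List.pyRange (j : Int) (n : Int) 1).reverse).foldl
      (fun (st : List (Option Int) × Option Int) k =>
        (pvMinInf ((PySem.List.pyGet? fw k).getD none)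
           (pvDistanceBetween k (if pvMatch ar req k then some k else st.2)) :: st.1,
         if pvMatch ar req k then some k else st.2))
      (res0, pvLmb ar req n)
    = ((PySem.List.pyRange (j : Int) (n : Int) 1).map
         (fun k => pvMinInf ((PySem.List.pyGet? fw k).getD none)
           (pvDistanceBetween k (pvC2 ar req n k.toNat))) ++ res0,
       pvC2 ar req n j) := by
  intro j
  induction hd : n - j generalizing j with
  | zero =>
    intro hle res0
    have hjn : j = n := by omega
    subst hjn
    rw [PySem.List.pyRange_one_eq_nil (le_refl _)]
    simp only [List.reverse_nil, List.foldl_nil, List.map_nil, List.nil_append]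
    unfold pvC2
    simp
  | succ m ih =>
    intro hle res0
    have hj : j < n := by omega
    rw [PySem.List.pyRange_one_cons (by exact_mod_cast hj), List.reverse_cons, List.foldl_append]
    rw [show ((j : Int) + 1) = (((j + 1 : Nat)) : Int) by push_cast; ring]
    rw [ih (j + 1) (by omega) (by omega) res0]
    simp only [List.foldl_cons, List.foldl_nil, List.map_cons, Int.toNat_natCast]
    have hc2 : (if pvMatch ar req (j : Int) then some (j : Int) else pvC2 ar req n (j + 1))
        = pvC2 ar req n j := by
      conv_rhs => unfold pvC2
      rw [dif_pos hj]
    rw [hc2]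
    simp

theorem pv_bwd_zero (ar : List (List (String × Bool))) (req : String) (n : Nat)
    (fw : List (Option Int)) :
    ((PySem.List.pyRange 0 (n : Int) 1).reverse).foldl
      (fun (st : List (Option Int) × Option Int) k =>
        (pvMinInf ((PySem.List.pyGet? fw k).getD none)
           (pvDistanceBetween k (if pvMatch ar req k then some k else st.2)) :: st.1,
         if pvMatch ar req k then some k else st.2))
      ([], pvLmb ar req n)
    = ((PySem.List.pyRange 0 (n : Int) 1).map
         (fun k => pvMinInf ((PySem.List.pyGet? fw k).getD none)
           (pvDistanceBetween k (pvC2 ar req n k.toNat))) ++ [],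
       pvC2 ar req n 0) := by
  have h := pv_bwd_eq ar req n fw 0 (Nat.zero_le n) []
  simpa using h

theorem pv_A_eq (ar : List (List (String × Bool))) (req : String) :
    getMini ar req = (List.range ar.length).map (fun j => pvVA ar req ar.length j) := by
  simp only [getMini]
  rw [pv_fwd_eq]
  simp only []
  rw [pv_bwd_zero]
  simp only [List.append_nil]
  rw [PySem.List.pyRange_zero_natCast, List.map_map, List.map_map]
  refine List.map_congr_left (fun j hj => ?_)
  have hjn : j < ar.length := List.mem_range.mp hj
  simp only [Function.comp]
  rw [PySem.List.pyGet?_natCast]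
  rw [List.getElem?_map, List.getElem?_range hjn]
  simp [pvVA, Int.toNat_natCast]

-- B's pointer value at the start of iteration j
def pvKst (ar : List (List (String × Bool))) (req : String) : Nat → Int
  | 0 => 0
  | j + 1 => ((pvPk ar req j).length : Int)

theorem pvPk_mem {ar : List (List (String × Bool))} {req : String} {k : Nat} {x : Int}
    (h : x ∈ pvPk ar req k) : 0 ≤ x ∧ x < (k : Int) := by
  have h' := (List.mem_filter.mp h).1
  rw [PySem.List.mem_pyRange_one] at h'
  exact h'

theorem pvSfx_mem {ar : List (List (String × Bool))} {req : String} {n j : Nat} {x : Int}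
    (h : x ∈ pvSfx ar req n j) : (j : Int) ≤ x ∧ x < (n : Int) := by
  have h' := (List.mem_filter.mp h).1
  rw [PySem.List.mem_pyRange_one] at h'
  exact h'

theorem pvPk_zero (ar : List (List (String × Bool))) (req : String) : pvPk ar req 0 = [] := by
  simp [pvPk, PySem.List.pyRange_one_eq_nil]

-- the pointer adjustment inside iteration j lands on (pvPk j).length
theorem pv_adjust (ar : List (List (String × Bool))) (req : String) (n j : Nat) (hjn : j < n) :
    (if (decide (pvKst ar req j < ((pvPk ar req n).length : Int)) &&
          decide (PySem.List.pyGetD (pvPk ar req n) (pvKst ar req j) 0 < (j : Int))) = true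
     then pvKst ar req j + 1 else pvKst ar req j) = ((pvPk ar req j).length : Int) := by
  cases j with
  | zero =>
    cases hP : pvPk ar req n with
    | nil => simp [pvKst, pvPk_zero]
    | cons a t =>
      have ha : 0 ≤ a := (pvPk_mem (hP ▸ List.mem_cons_self)).1
      simp [pvKst, pvPk_zero, PySem.List.pyGetD_zero_cons]
      omega
  | succ m =>
    have hmn : m ≤ n := by omega
    have hsplit := pvSfx_split ar req n m hmn
    by_cases hm : pvMatch ar req (m : Int)
    · have hS : pvSfx ar req n m = (m : Int) :: pvSfx ar req n (m + 1) := by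
        rw [pvSfx_cons ar req n m (by omega)]; simp [hm]
      rw [hS] at hsplit
      have hget : PySem.List.pyGetD (pvPk ar req n) ((pvPk ar req m).length : Int) 0 = (m : Int) := by
        rw [hsplit, PySem.List.pyGetD_natCast, List.getD_eq_getElem?_getD,
            List.getElem?_append_right (le_refl _)]
        simp
      have hlen : ((pvPk ar req m).length : Int) < ((pvPk ar req n).length : Int) := by
        rw [hsplit]; simp
      have hrhs : pvPk ar req (m + 1) = pvPk ar req m ++ [(m : Int)] := by
        rw [pvPk_succ]; simp [hm]
      simp only [pvKst, hget, hlen]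
      simp [hrhs]
    · have hS : pvSfx ar req n m = pvSfx ar req n (m + 1) := by
        rw [pvSfx_cons ar req n m (by omega)]; simp [hm]
      have hrhs : pvPk ar req (m + 1) = pvPk ar req m := by
        rw [pvPk_succ]; simp [hm]
      rw [hS] at hsplit
      cases hS' : pvSfx ar req n (m + 1) with
      | nil =>
        rw [hS'] at hsplit
        simp only [pvKst, hrhs]
        rw [hsplit]
        simp
      | cons h t =>
        have hh : ((m : Nat) + 1 : Int) ≤ h := by
          have := (pvSfx_mem (hS' ▸ List.mem_cons_self)).1
          exact_mod_cast this
        rw [hS'] at hsplit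
        have hget : PySem.List.pyGetD (pvPk ar req n) ((pvPk ar req m).length : Int) 0 = h := by
          rw [hsplit, PySem.List.pyGetD_natCast, List.getD_eq_getElem?_getD,
              List.getElem?_append_right (le_refl _)]
          simp
        simp only [pvKst, hrhs, hget]
        have : ¬ (h < ((m : Nat) + 1 : Int)) := by push_cast at hh ⊢; omega
        simp [this]

theorem pv_b_inv (ar : List (List (String × Bool))) (req : String) (n : Nat) (P : List Int)
    (hP : P = pvPk ar req n) :
    ∀ j : Nat, j ≤ n →
    (PySem.List.pyRange 0 (j : Int) 1).foldl
      (fun (st : List Int × Int) i =>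
        (st.1 ++ [if (if (decide (st.2 < (P.length : Int)) && decide (PySem.List.pyGetD P st.2 0 < i)) = true then st.2 + 1 else st.2) = (P.length : Int) then
              i - PySem.List.pyGetD P (-1) 0
            else if (if (decide (st.2 < (P.length : Int)) && decide (PySem.List.pyGetD P st.2 0 < i)) = true then st.2 + 1 else st.2) = 0 then
              PySem.List.pyGetD P 0 0 - i
            else
              min (PySem.List.pyGetD P (if (decide (st.2 < (P.length : Int)) && decide (PySem.List.pyGetD P st.2 0 < i)) = true then st.2 + 1 else st.2) 0 - i)
                  (i - PySem.List.pyGetD P ((if (decide (st.2 < (P.length : Int)) && decide (PySem.List.pyGetD P st.2 0 < i)) = true then st.2 + 1 else st.2) - 1) 0)],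
         if (decide (st.2 < (P.length : Int)) && decide (PySem.List.pyGetD P st.2 0 < i)) = true then st.2 + 1 else st.2))
      ([], 0)
    = ((List.range j).map (fun (i : Nat) => pvWB ar req n i), pvKst ar req j) := by
  intro j
  induction j with
  | zero =>
    intro _
    simp [PySem.List.pyRange_one_eq_nil, pvKst]
  | succ j ih =>
    intro hle
    have hjn : j < n := by omega
    push_cast
    rw [PySem.List.pyRange_one_succ_right (by positivity), List.foldl_append, ih (by omega)]
    simp only [List.foldl_cons, List.foldl_nil]
    subst hP
    rw [pv_adjust ar req n j hjn]
    rw [Prod.mk.injEq]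
    refine ⟨?_, ?_⟩
    · rw [List.range_succ, List.map_append, List.map_cons, List.map_nil]
      simp [pvWB]
    · simp [pvKst]

theorem pv_B_eq (ar : List (List (String × Bool))) (req : String)
    (hne : pvPk ar req ar.length ≠ []) :
    getMini_alt ar req = (List.range ar.length).map (fun j => pvWB ar req ar.length j) := by
  have hne' : ¬ ((List.filter (fun i => pvMatch ar req i) (PySem.List.pyRange 0 (ar.length : Int) 1)).isEmpty = true) := by
    rw [List.isEmpty_iff]
    exact hne
  simp only [getMini_alt]
  rw [if_neg hne']
  rw [pv_b_inv ar req ar.length (List.filter (fun i => pvMatch ar req i) (PySem.List.pyRange 0 (ar.length : Int) 1)) rfl ar.length (le_refl _)]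

theorem pv_getD_at (A : List Int) (x : Int) (rest : List Int) :
    PySem.List.pyGetD (A ++ x :: rest) (A.length : Int) 0 = x := by
  rw [PySem.List.pyGetD_natCast, List.getD_eq_getElem?_getD,
      List.getElem?_append_right (le_refl _)]
  simp

theorem pv_getD_pred (A : List Int) (rest : List Int) (h : A ≠ []) :
    PySem.List.pyGetD (A ++ rest) ((A.length : Int) - 1) 0 = A.getLast h := by
  have h1 : 1 ≤ A.length := List.length_pos_iff.mpr h
  rw [show ((A.length : Int) - 1) = ((A.length - 1 : Nat) : Int) by omega]
  rw [PySem.List.pyGetD_natCast, List.getD_eq_getElem?_getD,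
      List.getElem?_append_left (by omega), List.getElem?_eq_getElem (by omega)]
  rw [List.getLast_eq_getElem]
  rfl

theorem pv_pointwise (ar : List (List (String × Bool))) (req : String) (n j : Nat) (hj : j < n)
    (hne : pvPk ar req n ≠ []) : pvWB ar req n j = pvVA ar req n j := by
  have hsplit := pvSfx_split ar req n j (le_of_lt hj)
  have hAmem : ∀ x ∈ pvPk ar req j, 0 ≤ x ∧ x < (j : Int) := fun x hx => pvPk_mem hx
  unfold pvVA pvWB
  rw [pvLmb_eq, pvC2_eq ar req n j (le_of_lt hj), pvLmb_eq]
  by_cases hm : pvMatch ar req (j : Int)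
  · have hPk1 : pvPk ar req (j + 1) = pvPk ar req j ++ [(j : Int)] := by
      rw [pvPk_succ]; simp [hm]
    have hS : pvSfx ar req n j = (j : Int) :: pvSfx ar req n (j + 1) := by
      rw [pvSfx_cons ar req n j hj]; simp [hm]
    rw [hS] at hsplit
    have hlen : ¬ (((pvPk ar req j).length : Int) = ((pvPk ar req n).length : Int)) := by
      rw [hsplit]; simp; omega
    rw [if_neg hlen, hPk1, hS]
    by_cases hA0 : pvPk ar req j = []
    · rw [hA0] at hsplit ⊢
      simp [hsplit, PySem.List.pyGetD_zero_cons, pvDistanceBetween, pvMinInf]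
    · have h0 : ¬ (((pvPk ar req j).length : Int) = 0) := by
        have := List.length_pos_iff.mpr hA0; omega
      have hlast := hAmem _ (List.getLast_mem hA0)
      rw [if_neg h0, hsplit, pv_getD_at, pv_getD_pred _ _ hA0]
      simp only [List.head?_cons, Option.elim, List.getLast?_concat, pvDistanceBetween,
        Option.map_some, pvMinInf]
      rw [sub_self, abs_zero, min_self]
      simp [min_eq_left (by omega : (0 : Int) ≤ (j : Int) - (pvPk ar req j).getLast hA0)]
  · have hPk1 : pvPk ar req (j + 1) = pvPk ar req j := by
      rw [pvPk_succ]; simp [hm]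
    have hS : pvSfx ar req n j = pvSfx ar req n (j + 1) := by
      rw [pvSfx_cons ar req n j hj]; simp [hm]
    rw [hS] at hsplit
    cases hS2 : pvSfx ar req n (j + 1) with
    | nil =>
      rw [hS2, List.append_nil] at hsplit
      have hA0 : pvPk ar req j ≠ [] := by rw [← hsplit]; exact hne
      have hlast := hAmem _ (List.getLast_mem hA0)
      have hlen : (((pvPk ar req j).length : Int) = ((pvPk ar req n).length : Int)) := by
        rw [hsplit]
      rw [if_pos hlen, hPk1, hS, hS2, hsplit, PySem.List.pyGetD_neg_one _ 0 hA0]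
      simp only [List.head?_nil, Option.elim]
      rw [List.getLast?_eq_some_getLast hA0]
      simp only [pvDistanceBetween, Option.map_some, pvMinInf, min_self, Option.getD_some]
      rw [abs_of_nonneg (by omega)]
    | cons h t =>
      have hh : ((j : Int) + 1) ≤ h := by
        have := (pvSfx_mem (hS2 ▸ List.mem_cons_self)).1
        push_cast at this ⊢
        omega
      rw [hS2] at hsplit
      have hlen : ¬ (((pvPk ar req j).length : Int) = ((pvPk ar req n).length : Int)) := by
        rw [hsplit]; simp; omega
      rw [if_neg hlen, hPk1, hS, hS2]
      by_cases hA0 : pvPk ar req j = []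
      · rw [hA0] at hsplit ⊢
        simp only [hsplit, List.nil_append, List.length_nil, Nat.cast_zero,
          PySem.List.pyGetD_zero_cons, List.head?_cons, Option.elim, pvDistanceBetween,
          pvMinInf]
        simp
        rw [abs_of_nonpos (by omega)]
        ring
      · have h0 : ¬ (((pvPk ar req j).length : Int) = 0) := by
          have := List.length_pos_iff.mpr hA0; omega
        have hlast := hAmem _ (List.getLast_mem hA0)
        rw [if_neg h0, hsplit, pv_getD_at, pv_getD_pred _ _ hA0]
        simp only [List.head?_cons, Option.elim]
        rw [List.getLast?_eq_some_getLast hA0]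
        simp only [pvDistanceBetween, Option.map_some, pvMinInf, Option.getD_some]
        rw [abs_of_nonneg (by omega), abs_of_nonpos (by omega), min_comm]
        congr 1
        ring

theorem pv_pre_nonempty (ar : List (List (String × Bool))) (req : String)
    (h : Pre_getMini ar req) : pvPk ar req ar.length ≠ [] := by
  obtain ⟨row, hrow, hv⟩ := h.2
  obtain ⟨k, hk, hget⟩ := List.mem_iff_getElem.mp hrow
  have hmem : ((k : Int)) ∈ pvPk ar req ar.length := by
    apply List.mem_filter.mpr
    refine ⟨?_, ?_⟩
    · rw [PySem.List.mem_pyRange_one]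
      constructor <;> [positivity; exact_mod_cast hk]
    · simp only [pvMatch, PySem.List.pyGet?_natCast, List.getElem?_eq_getElem hk, hget, hv]
      rfl
  exact List.ne_nil_of_mem hmem

-- ===== VERDICT (by name: the statement is the Claim_ definition above) =====
theorem getMini_spec : Claim_equal_getMini := by
  intro ar req _hd hpre
  have hne := pv_pre_nonempty ar req hpre
  unfold Spec_getMini
  rw [pv_A_eq, pv_B_eq ar req hne]
  exact List.map_congr_left (fun j hj => (pv_pointwise ar req ar.length j (List.mem_range.mp hj) hne).symm)
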